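-- pv_equiv track=rewrite | github.com/open-imx/imxInsights | imxInsights/utils/flatten_unflatten.py | reindex_dict
-- ===== SOURCE A (Python) =====
-- from collections import defaultdict
-- from typing import Any
--
-- def reindex_dict(data: dict[str, str]) -> dict[str, str]:
--     # Initialize an empty dictionary to store the new data with reindexed keys
--     new_data: dict[str, Any] = {}
--
--     # index_map keeps track of the mapping from parent key (path) to a dictionary of
--     # original indices and their corresponding new indices for each parent
--     index_map: defaultdict[str, dict[str, int]] = defaultdict(dict)
--
--     # counter_map tracks how many items we've seen under each parent to assign new indices
--     counter_map: defaultdict[str, int] = defaultdict(int)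
--
--     # Iterate through each key-value pair in the input dictionary
--     for key, value in data.items():
--         # Split the key by dots to get individual segments (path parts)
--         parts: list[str] = key.split(".")
--         new_parts: list[
--             str
--         ] = []  # List to store the transformed key parts with new indices
--         current_path: list[str] = []  # This will track the current path as we build it
--
--         # Iterate over each part of the key
--         for part in parts:
--             # Check if the current part is a numeric index (as string)
--             if part.isdigit():
--                 # Join the current path to form the parent key (before this numeric part)
--                 parent: str = ".".join(current_path)
--
--                 # If this numeric part hasn't been seen under the current parent, assign the next available index
--                 if part not in index_map[parent]:
--                     new_index: int = counter_map[
--                         parent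
--                     ]  # Get the next index for this parent
--                     index_map[parent][part] = (
--                         new_index  # Update the mapping for this part under the parent
--                     )
--                     counter_map[parent] += 1  # Increment the counter for the next index
--                 else:
--                     # If the numeric part has already been encountered, retrieve the existing index
--                     new_index = index_map[parent][part]
--
--                 # Add the new index to the new parts list and update the current path
--                 new_parts.append(str(new_index))
--                 current_path.append(str(new_index))
--             else:
--                 # If the part is not a number, just add it to the new parts and current path
--                 new_parts.append(part)
--                 current_path.append(part)
--
--         # Reassemble the transformed key with the new parts
--         new_key: str = ".".join(new_parts)
--         # Assign the value to the new key in the new data dictionary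
--         new_data[new_key] = value
--
--     return new_data
-- ===== SOURCE B (Python) =====
-- def reindex_dict(data: dict[str, str]) -> dict[str, str]:
--     # single map: parent path -> {original numeric segment: new index};
--     # the new index for a fresh segment is simply the map's current size,
--     # so no separate counter is needed.
--     maps: dict[str, dict[str, int]] = {}
--
--     def rekey(path, parts):
--         # path is None before the first segment; afterwards it is the
--         # dotted join of the already-rewritten segments (the parent path).
--         if not parts:
--             return "" if path is None else path
--         part, rest = parts[0], parts[1:]
--         if part.isdigit():
--             m = maps.setdefault("" if path is None else path, {})
--             if part not in m:
--                 m[part] = len(m)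
--             part = str(m[part])
--         return rekey(part if path is None else path + "." + part, rest)
--
--     out: dict[str, str] = {}
--     for key, value in data.items():
--         out[rekey(None, key.split("."))] = value
--     return out
-- ===== Notes on version B (the rewrite author's own statement) =====
-- stated objective: simpler
-- what changed: B drops A's separate counter_map and the new_parts/current_path list building: a single map per parent whose size is the next index, and a tail-recursive rekey that threads the rewritten dotted parent path as an optional string instead of joining part lists.
import Mathlib
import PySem

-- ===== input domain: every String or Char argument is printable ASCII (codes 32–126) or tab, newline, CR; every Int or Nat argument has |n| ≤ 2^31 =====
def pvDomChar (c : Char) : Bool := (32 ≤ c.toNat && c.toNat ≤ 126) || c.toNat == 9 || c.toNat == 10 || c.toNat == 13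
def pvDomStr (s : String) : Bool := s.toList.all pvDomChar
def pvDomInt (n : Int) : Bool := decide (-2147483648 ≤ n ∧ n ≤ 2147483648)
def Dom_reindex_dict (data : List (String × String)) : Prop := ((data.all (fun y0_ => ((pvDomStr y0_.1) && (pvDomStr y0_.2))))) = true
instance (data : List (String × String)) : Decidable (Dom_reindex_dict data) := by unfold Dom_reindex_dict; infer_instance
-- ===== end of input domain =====

-- B replaces A's two parallel maps (index_map + counter_map) and list-building inner loop
-- by a single map whose per-parent size IS the counter, and a tail-recursive rekey that
-- builds the dotted key incrementally; objective: simpler (no counter map, no part lists).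

-- ===== PORT A =====
-- inner loop body of A: state (new_parts, current_path, index_map, counter_map)
def stepA (st : List String × List String × PySem.Dict String (PySem.Dict String Int) × PySem.Dict String Int)
    (part : String) :
    List String × List String × PySem.Dict String (PySem.Dict String Int) × PySem.Dict String Int :=
  match st with
  | (new_parts, current_path, imap, cmap) =>
    if PySem.Str.strIsdigit part then
      let parent := PySem.Str.join "." current_path
      let m := imap.getD parent PySem.Dict.empty
      if m.contains part then
        let ni := m.getD part 0
        (new_parts ++ [PySem.Int.toStr ni], current_path ++ [PySem.Int.toStr ni], imap, cmap)
      else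
        let ni := cmap.getD parent 0
        (new_parts ++ [PySem.Int.toStr ni], current_path ++ [PySem.Int.toStr ni],
         imap.insert parent (m.insert part ni), cmap.insert parent (ni + 1))
    else
      (new_parts ++ [part], current_path ++ [part], imap, cmap)

def reindex_dict (data : List (String × String)) : List (String × String) :=
  (data.foldl
    (fun st kv =>
      match st with
      | (new_data, imap, cmap) =>
        match ((PySem.Str.split? kv.1 ".").getD []).foldl stepA ([], [], imap, cmap) with
        | (new_parts, _, imap', cmap') =>
          (new_data.insert (PySem.Str.join "." new_parts) kv.2, imap', cmap'))
    (PySem.Dict.empty, PySem.Dict.empty, PySem.Dict.empty)).1.items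

-- ===== PORT B =====
-- Source B's rekey: path = None before the first segment, else the dotted join so far
def rekeyB (maps : PySem.Dict String (PySem.Dict String Int)) (path : Option String)
    (parts : List String) : String × PySem.Dict String (PySem.Dict String Int) :=
  match parts with
  | [] => (path.getD "", maps)
  | part :: rest =>
    let pm : String × PySem.Dict String (PySem.Dict String Int) :=
      if PySem.Str.strIsdigit part then
        let parent := path.getD ""
        let maps1 := maps.setdefault parent PySem.Dict.empty
        let m := maps1.getD parent PySem.Dict.empty
        let mm : PySem.Dict String Int × PySem.Dict String (PySem.Dict String Int) :=
          if m.contains part then (m, maps1)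
          else (m.insert part (m.size : Int), maps1.insert parent (m.insert part (m.size : Int)))
        (PySem.Int.toStr (mm.1.getD part 0), mm.2)
      else (part, maps)
    rekeyB pm.2 (some (match path with | none => pm.1 | some p => p ++ "." ++ pm.1)) rest

def reindex_dict_alt (data : List (String × String)) : List (String × String) :=
  (data.foldl
    (fun st kv =>
      match st with
      | (out, maps) =>
        let r := rekeyB maps none ((PySem.Str.split? kv.1 ".").getD [])
        (out.insert r.1 kv.2, r.2))
    (PySem.Dict.empty, PySem.Dict.empty)).1.items

-- ===== PRECONDITION & SPEC =====
def Spec_reindex_dict (data : List (String × String)) (out : List (String × String)) : Prop := out = reindex_dict_alt data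
instance (data : List (String × String)) (out : List (String × String)) : Decidable (Spec_reindex_dict data out) := by unfold Spec_reindex_dict; infer_instance

-- ===== CLAIM (what is proved, stated in full; the proofs are below) =====
def Claim_equal_reindex_dict : Prop := ∀ (data : List (String × String)), Dom_reindex_dict data → Spec_reindex_dict data (reindex_dict data)

-- ===== LEMMAS AND PROOFS =====

-- counter_map value = size of the index_map entry, at every parent
def ReInv (imap : PySem.Dict String (PySem.Dict String Int)) (cmap : PySem.Dict String Int) : Prop :=
  ∀ p : String, cmap.getD p 0 = ((imap.getD p PySem.Dict.empty).size : Int)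

-- B's Option-path corresponding to A's current_path list
def optPath (l : List String) : Option String :=
  match l with
  | [] => none
  | _ => some (PySem.Str.join "." l)

theorem chars_join_append_singleton (sep : List Char) (ps : List (List Char)) (q : List Char)
    (h : ps ≠ []) :
    PySem.Chars.join sep (ps ++ [q]) = PySem.Chars.join sep ps ++ sep ++ q := by
  induction ps with
  | nil => exact absurd rfl h
  | cons a t ih =>
    cases t with
    | nil => simp [PySem.Chars.join_cons_cons, PySem.Chars.join_singleton]
    | cons b t' =>
      have := ih (by simp)
      simp only [List.cons_append] at *
      rw [PySem.Chars.join_cons_cons, this, PySem.Chars.join_cons_cons]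
      simp [List.append_assoc]

theorem join_singleton_str (s : String) : PySem.Str.join "." [s] = s := by
  rw [← String.toList_inj, PySem.Str.toList_join]
  simp [PySem.Chars.join_singleton]

theorem join_append_singleton (l : List String) (s : String) (h : l ≠ []) :
    PySem.Str.join "." (l ++ [s]) = PySem.Str.join "." l ++ "." ++ s := by
  rw [← String.toList_inj, PySem.Str.toList_join, List.map_append, List.map_singleton]
  rw [chars_join_append_singleton _ _ _ (by simpa using h)]
  simp [PySem.Str.toList_join]

theorem join_empty_str : PySem.Str.join "." ([] : List String) = "" := by
  rw [← String.toList_inj, PySem.Str.toList_join]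
  simp [PySem.Chars.join_nil]

-- one inner step: A's state and B's state stay related
theorem optPath_getD (cp : List String) : (optPath cp).getD "" = PySem.Str.join "." cp := by
  cases cp with
  | nil => simp [optPath, join_empty_str]
  | cons a t => simp [optPath]

theorem optPath_snoc (cp : List String) (s : String) :
    (some (match optPath cp with | none => s | some p => p ++ "." ++ s) : Option String)
      = optPath (cp ++ [s]) := by
  cases cp with
  | nil => simp [optPath, join_singleton_str]
  | cons a t =>
    simp only [optPath, List.cons_append]
    rw [show a :: (t ++ [s]) = (a :: t) ++ [s] from rfl,
      join_append_singleton (a :: t) s (by simp)]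

theorem inner_loop (parts : List String) (cp : List String)
    (imap : PySem.Dict String (PySem.Dict String Int)) (cmap : PySem.Dict String Int)
    (hInv : ReInv imap cmap) :
    rekeyB imap (optPath cp) parts =
      ((parts.foldl stepA (cp, cp, imap, cmap)).1 |> PySem.Str.join ".",
       (parts.foldl stepA (cp, cp, imap, cmap)).2.2.1) ∧
    (parts.foldl stepA (cp, cp, imap, cmap)).1 = (parts.foldl stepA (cp, cp, imap, cmap)).2.1 ∧
    ReInv (parts.foldl stepA (cp, cp, imap, cmap)).2.2.1 (parts.foldl stepA (cp, cp, imap, cmap)).2.2.2 := by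
  induction parts generalizing cp imap cmap with
  | nil =>
    refine ⟨?_, rfl, hInv⟩
    simp only [rekeyB, List.foldl_nil]
    cases cp with
    | nil => simp [optPath, join_empty_str]
    | cons a t => simp [optPath]
  | cons part rest ih =>
    by_cases hd : PySem.Str.strIsdigit part = true
    · -- numeric segment
      by_cases hcont : (imap.getD (PySem.Str.join "." cp) PySem.Dict.empty).contains part = true
      · -- already indexed
        have hpc : imap.contains (PySem.Str.join "." cp) = true := by
          by_contra hnc
          rw [PySem.Dict.getD_of_not_contains _ _ (by simpa using hnc)] at hcont
          simp [PySem.Dict.contains_empty] at hcont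
        simp only [List.foldl_cons, rekeyB, stepA, hd, if_true, optPath_getD,
          PySem.Dict.setdefault_of_contains _ _ hpc, hcont]
        rw [optPath_snoc]
        exact ih _ _ _ hInv
      · -- fresh numeric segment
        have hni : cmap.getD (PySem.Str.join "." cp) 0
            = ((imap.getD (PySem.Str.join "." cp) PySem.Dict.empty).size : Int) := hInv _
        have hmaps1 : (imap.setdefault (PySem.Str.join "." cp) PySem.Dict.empty).getD
              (PySem.Str.join "." cp) PySem.Dict.empty
            = imap.getD (PySem.Str.join "." cp) PySem.Dict.empty := by
          by_cases hpc : imap.contains (PySem.Str.join "." cp) = true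
          · rw [PySem.Dict.setdefault_of_contains _ _ hpc]
          · rw [PySem.Dict.setdefault_of_not_contains _ _ (by simpa using hpc),
              PySem.Dict.getD_insert_self,
              PySem.Dict.getD_of_not_contains _ _ (by simpa using hpc)]
        have hmaps2 : (imap.setdefault (PySem.Str.join "." cp) PySem.Dict.empty).insert
              (PySem.Str.join "." cp)
              ((imap.getD (PySem.Str.join "." cp) PySem.Dict.empty).insert part
                ((imap.getD (PySem.Str.join "." cp) PySem.Dict.empty).size : Int))
            = imap.insert (PySem.Str.join "." cp)
              ((imap.getD (PySem.Str.join "." cp) PySem.Dict.empty).insert part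
                ((imap.getD (PySem.Str.join "." cp) PySem.Dict.empty).size : Int)) := by
          by_cases hpc : imap.contains (PySem.Str.join "." cp) = true
          · rw [PySem.Dict.setdefault_of_contains _ _ hpc]
          · rw [PySem.Dict.setdefault_of_not_contains _ _ (by simpa using hpc),
              PySem.Dict.insert_insert_self]
        have hInv' : ReInv
            (imap.insert (PySem.Str.join "." cp)
              ((imap.getD (PySem.Str.join "." cp) PySem.Dict.empty).insert part
                (cmap.getD (PySem.Str.join "." cp) 0)))
            (cmap.insert (PySem.Str.join "." cp) (cmap.getD (PySem.Str.join "." cp) 0 + 1)) := by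
          intro p
          rw [PySem.Dict.getD_insert, PySem.Dict.getD_insert]
          by_cases hp : p = PySem.Str.join "." cp
          · simp only [hp, if_true]
            rw [PySem.Dict.size_insert, if_neg (by simp [hcont]), hni]
            push_cast
            ring
          · simp only [if_neg hp]
            exact hInv p
        simp only [List.foldl_cons, rekeyB, stepA, hd, if_true, optPath_getD, hmaps1,
          hcont, Bool.false_eq_true, ite_false, hmaps2,
          PySem.Dict.getD_insert_self, hni]
        rw [optPath_snoc]
        rw [hni] at hInv'
        exact ih _ _ _ hInv'
    · -- non-numeric segment
      simp only [List.foldl_cons, rekeyB, stepA, hd, Bool.false_eq_true, if_false]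
      rw [optPath_snoc]
      exact ih _ _ _ hInv

-- outer loop
theorem outer_loop (data : List (String × String))
    (nd : PySem.Dict String String)
    (imap : PySem.Dict String (PySem.Dict String Int)) (cmap : PySem.Dict String Int)
    (hInv : ReInv imap cmap) :
    (data.foldl
      (fun st kv =>
        match st with
        | (new_data, imap, cmap) =>
          match ((PySem.Str.split? kv.1 ".").getD []).foldl stepA ([], [], imap, cmap) with
          | (new_parts, _, imap', cmap') =>
            (new_data.insert (PySem.Str.join "." new_parts) kv.2, imap', cmap'))
      (nd, imap, cmap)).1 =
    (data.foldl
      (fun st kv =>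
        match st with
        | (out, maps) =>
          let r := rekeyB maps none ((PySem.Str.split? kv.1 ".").getD [])
          (out.insert r.1 kv.2, r.2))
      (nd, imap)).1 := by
  induction data generalizing nd imap cmap with
  | nil => rfl
  | cons kv rest ih =>
    have h := inner_loop ((PySem.Str.split? kv.1 ".").getD []) [] imap cmap hInv
    simp only [optPath] at h
    simp only [List.foldl_cons, h.1]
    exact ih _ _ _ h.2.2

-- ===== VERDICT (by name: the statement is the Claim_ definition above) =====
theorem reindex_dict_spec : Claim_equal_reindex_dict := by
  intro data _
  unfold Spec_reindex_dict reindex_dict reindex_dict_alt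
  rw [outer_loop data PySem.Dict.empty PySem.Dict.empty PySem.Dict.empty
    (by intro p; simp [PySem.Dict.getD_empty, PySem.Dict.size_empty])]
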